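-- pv_equiv track=rewrite | github.com/Ricky-Hu5918/Python-Lab | subtractProductAndSum.py | subtractProductAndSum2
-- ===== SOURCE A (Python) =====
-- from functools import reduce
--
-- def subtractProductAndSum2(n):
--     pr, su = 1, 0
--     num = []
--     while n >= 10:
--         num.append(n % 10)
--         n = int(n / 10)
--
--     num.append(n)
--     return (reduce(lambda x,y:x*y, num)-reduce(lambda x,y:x+y, num))
-- ===== SOURCE B (Python) =====
-- def subtractProductAndSum2(n):
--     # Recursive decomposition: ps(n) returns (product, sum) of n's digits
--     # (with n itself as the single "digit" when n < 10, matching A's loop).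
--     # Structure: recursion on the quotient first, then the current digit is
--     # folded in on the way back up -- no digit list, no reduce passes.
--     def ps(n):
--         if n < 10:
--             return (n, n)
--         p, s = ps(n // 10)
--         d = n % 10
--         return (p * d, s + d)
--     p, s = ps(n)
--     return p - s
-- ===== Notes on version B (the rewrite author's own statement) =====
-- stated objective: alternative
-- what changed: B replaces A's iterative digit-list construction followed by two separate reduce passes with a recursive helper that returns the (product, sum) pair directly: it recurses on the quotient down to the base case and folds each digit in on the way back up, so the intermediate list and both reduce passes disappear and the digits are combined most-significant-first instead of in A's list order.
import Mathlib
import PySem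

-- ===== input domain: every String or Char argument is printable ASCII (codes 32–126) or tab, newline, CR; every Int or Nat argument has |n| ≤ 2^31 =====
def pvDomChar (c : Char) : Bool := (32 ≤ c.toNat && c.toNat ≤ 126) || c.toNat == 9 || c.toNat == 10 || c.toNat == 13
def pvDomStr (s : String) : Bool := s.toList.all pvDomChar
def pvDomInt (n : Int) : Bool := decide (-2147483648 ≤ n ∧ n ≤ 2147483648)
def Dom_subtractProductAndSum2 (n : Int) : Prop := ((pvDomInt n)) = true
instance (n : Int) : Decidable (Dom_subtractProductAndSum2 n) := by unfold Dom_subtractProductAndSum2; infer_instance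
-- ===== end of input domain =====

-- B replaces A's digit-list + two reduce passes with a recursive helper returning the
-- (product, sum) pair directly (an alternative decomposition; same O(d) cost).
-- ===== PORT A =====
-- A's `int(n / 10)` truncates toward zero; inside the loop n ≥ 10 > 0, where truncation
-- equals floor, so PySem.Int.floordiv is exact there (and |n| ≤ 2^31 < 2^53 keeps the
-- float division exact in Python).
def pvCollectDigits (n : Int) : List Int :=
  if _h : n ≥ 10 then (PySem.Int.mod n 10) :: pvCollectDigits (PySem.Int.floordiv n 10) else [n]
  termination_by n.toNat
  decreasing_by
    rw [PySem.Int.floordiv_eq_ediv_of_pos (by norm_num : (0:Int) < 10)]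
    omega

-- reduce(f, num) on the nonempty list num: fold f over the tail with the head as seed
def pvReduceMul (xs : List Int) : Int :=
  match xs with
  | [] => 0  -- unreachable: pvCollectDigits is never empty
  | x :: rest => rest.foldl (· * ·) x

def pvReduceAdd (xs : List Int) : Int :=
  match xs with
  | [] => 0  -- unreachable
  | x :: rest => rest.foldl (· + ·) x

def subtractProductAndSum2 (n : Int) : Int :=
  pvReduceMul (pvCollectDigits n) - pvReduceAdd (pvCollectDigits n)

-- ===== PORT B =====
-- ps(n): recurse on n // 10 first, fold the current digit in on the way back up.
def pvPS (n : Int) : Int × Int :=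
  if _h : n < 10 then (n, n)
  else
    let ps := pvPS (PySem.Int.floordiv n 10)
    let d := PySem.Int.mod n 10
    (ps.1 * d, ps.2 + d)
  termination_by n.toNat
  decreasing_by
    rw [PySem.Int.floordiv_eq_ediv_of_pos (by norm_num : (0:Int) < 10)]
    omega

def subtractProductAndSum2_alt (n : Int) : Int := (pvPS n).1 - (pvPS n).2

-- ===== PRECONDITION & SPEC =====
def Spec_subtractProductAndSum2 (n : Int) (out : Int) : Prop := out = subtractProductAndSum2_alt n
instance (n : Int) (out : Int) : Decidable (Spec_subtractProductAndSum2 n out) := by unfold Spec_subtractProductAndSum2; infer_instance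

-- ===== CLAIM (what is proved, stated in full; the proofs are below) =====
def Claim_equal_subtractProductAndSum2 : Prop := ∀ (n : Int), Dom_subtractProductAndSum2 n → Spec_subtractProductAndSum2 n (subtractProductAndSum2 n)

-- ===== LEMMAS AND PROOFS =====
theorem pvCollectDigits_ne_nil (n : Int) : pvCollectDigits n ≠ [] := by
  unfold pvCollectDigits
  split <;> simp

theorem foldl_mul_shift (a b : Int) (xs : List Int) :
    xs.foldl (· * ·) (a * b) = a * xs.foldl (· * ·) b := by
  induction xs generalizing b with
  | nil => rfl
  | cons c xs ih => simpa [List.foldl, mul_assoc] using ih (b * c)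

theorem foldl_add_shift (a b : Int) (xs : List Int) :
    xs.foldl (· + ·) (a + b) = a + xs.foldl (· + ·) b := by
  induction xs generalizing b with
  | nil => rfl
  | cons c xs ih => simpa [List.foldl, add_assoc] using ih (b + c)

theorem pvReduceMul_cons (d : Int) (xs : List Int) (hxs : xs ≠ []) :
    pvReduceMul (d :: xs) = d * pvReduceMul xs := by
  cases xs with
  | nil => exact absurd rfl hxs
  | cons x rest => simp [pvReduceMul, List.foldl, foldl_mul_shift]

theorem pvReduceAdd_cons (d : Int) (xs : List Int) (hxs : xs ≠ []) :
    pvReduceAdd (d :: xs) = d + pvReduceAdd xs := by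
  cases xs with
  | nil => exact absurd rfl hxs
  | cons x rest => simp [pvReduceAdd, List.foldl, foldl_add_shift]

theorem pvPS_eq (n : Int) :
    pvPS n = (pvReduceMul (pvCollectDigits n), pvReduceAdd (pvCollectDigits n)) := by
  induction n using pvCollectDigits.induct with
  | case1 n h ih =>
    rw [pvPS, pvCollectDigits]
    have h' : ¬ n < 10 := by omega
    simp only [h, h', dif_pos, dif_neg, not_false_iff]
    rw [ih, pvReduceMul_cons _ _ (pvCollectDigits_ne_nil _),
        pvReduceAdd_cons _ _ (pvCollectDigits_ne_nil _)]
    simp [mul_comm, add_comm]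
  | case2 n h =>
    rw [pvPS, pvCollectDigits]
    have h' : n < 10 := by omega
    simp [h, h', pvReduceMul, pvReduceAdd]

-- ===== VERDICT (by name: the statement is the Claim_ definition above) =====
theorem subtractProductAndSum2_spec : Claim_equal_subtractProductAndSum2 := by
  intro n _
  unfold Spec_subtractProductAndSum2 subtractProductAndSum2 subtractProductAndSum2_alt
  rw [pvPS_eq]
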